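-- pv_equiv track=rewrite | github.com/dbmi-bgm/cgap-pipeline-cohort | dockerfiles/regenie/utils.py | get_worst_consequence
-- ===== SOURCE A (Python) =====
-- VEP_ORDER = {
--     # HIGH
--     'transcript_ablation': 1,
--     'splice_acceptor_variant': 2,
--     'splice_donor_variant': 3,
--     'stop_gained': 4,
--     'frameshift_variant': 5,
--     'stop_lost': 6,
--     'start_lost': 7,
--     'transcript_amplification': 8,
--     # MODERATE
--     'inframe_insertion': 9,
--     'inframe_deletion': 10,
--     'missense_variant': 11,
--     'protein_altering_variant': 12,
--     # LOW
--     'splice_region_variant': 13,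
--     'incomplete_terminal_codon_variant': 14,
--     'start_retained_variant': 15,
--     'stop_retained_variant': 16,
--     'synonymous_variant': 17,
--     # MODIFIER
--     'coding_sequence_variant': 18,
--     'mature_miRNA_variant': 19,
--     '5_prime_UTR_variant': 20,
--     '3_prime_UTR_variant': 21,
--     'intron_variant': 22,
--     'MODIFIER': 23
-- }
--
-- def get_worst_consequence(consequence, sep='&'):
--     ''' '''
--     consequence_tup = []
--     for cnsqce in consequence.split(sep):
--         try:
--             consequence_tup.append((VEP_ORDER[cnsqce], cnsqce))
--         except Exception:
--             consequence_tup.append((VEP_ORDER['MODIFIER'], cnsqce))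
--         #end try
--     #end for
--     return sorted(consequence_tup, key=lambda x_y: x_y[0])[0][1]
-- ===== SOURCE B (Python) =====
-- VEP_ORDER = {
--     # HIGH
--     'transcript_ablation': 1,
--     'splice_acceptor_variant': 2,
--     'splice_donor_variant': 3,
--     'stop_gained': 4,
--     'frameshift_variant': 5,
--     'stop_lost': 6,
--     'start_lost': 7,
--     'transcript_amplification': 8,
--     # MODERATE
--     'inframe_insertion': 9,
--     'inframe_deletion': 10,
--     'missense_variant': 11,
--     'protein_altering_variant': 12,
--     # LOW
--     'splice_region_variant': 13,
--     'incomplete_terminal_codon_variant': 14,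
--     'start_retained_variant': 15,
--     'stop_retained_variant': 16,
--     'synonymous_variant': 17,
--     # MODIFIER
--     'coding_sequence_variant': 18,
--     'mature_miRNA_variant': 19,
--     '5_prime_UTR_variant': 20,
--     '3_prime_UTR_variant': 21,
--     'intron_variant': 22,
--     'MODIFIER': 23
-- }
--
-- def get_worst_consequence(consequence, sep='&'):
--     ''' Single linear pass tracking the best (lowest-priority) token:
--     no tuple list, no sort; unknown tokens rank as MODIFIER (23). '''
--     tokens = consequence.split(sep)
--     best = tokens[0]
--     best_p = VEP_ORDER.get(best, 23)
--     for tok in tokens[1:]: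
--         p = VEP_ORDER.get(tok, 23)
--         if p < best_p:
--             best, best_p = tok, p
--     return best
-- ===== Notes on version B (the rewrite author's own statement) =====
-- stated objective: simpler
-- what changed: Replaces building a list of (priority, name) tuples and fully sorting it with a single linear pass that tracks the current best token, folding the try/except into VEP_ORDER.get(tok, 23).
import Mathlib
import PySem

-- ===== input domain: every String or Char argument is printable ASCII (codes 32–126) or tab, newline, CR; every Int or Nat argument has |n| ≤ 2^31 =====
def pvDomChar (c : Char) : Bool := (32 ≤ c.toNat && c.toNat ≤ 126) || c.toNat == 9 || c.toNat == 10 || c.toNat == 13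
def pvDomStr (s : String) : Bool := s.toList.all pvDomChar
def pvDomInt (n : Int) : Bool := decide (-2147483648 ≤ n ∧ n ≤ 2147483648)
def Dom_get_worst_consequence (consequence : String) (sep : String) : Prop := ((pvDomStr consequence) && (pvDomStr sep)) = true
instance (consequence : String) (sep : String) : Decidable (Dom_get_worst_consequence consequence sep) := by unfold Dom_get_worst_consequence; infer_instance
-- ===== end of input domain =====

-- B replaces A's build-tuples-then-sort with a single linear pass tracking the current best token
-- (objective: simpler — no sort, no intermediate tuple list).

-- ===== PORT A =====
def vepOrder : PySem.Dict String Int := PySem.Dict.ofList [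
  ("transcript_ablation", 1), ("splice_acceptor_variant", 2), ("splice_donor_variant", 3),
  ("stop_gained", 4), ("frameshift_variant", 5), ("stop_lost", 6), ("start_lost", 7),
  ("transcript_amplification", 8), ("inframe_insertion", 9), ("inframe_deletion", 10),
  ("missense_variant", 11), ("protein_altering_variant", 12), ("splice_region_variant", 13),
  ("incomplete_terminal_codon_variant", 14), ("start_retained_variant", 15),
  ("stop_retained_variant", 16), ("synonymous_variant", 17), ("coding_sequence_variant", 18),
  ("mature_miRNA_variant", 19), ("5_prime_UTR_variant", 20), ("3_prime_UTR_variant", 21),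
  ("intron_variant", 22), ("MODIFIER", 23)]

def get_worst_consequence (consequence : String) (sep : String) : String :=
  match PySem.Str.split? consequence sep with
  | none => ""        -- empty separator: Python raises ValueError; excluded by Pre_
  | some toks =>
    -- for cnsqce in …: try append (VEP_ORDER[cnsqce], cnsqce) except append (VEP_ORDER['MODIFIER'], cnsqce)
    let consequence_tup : List (Int × String) := toks.foldl (fun acc cnsqce =>
      acc ++ [match vepOrder.get? cnsqce with
              | some p => (p, cnsqce)
              | none => (vepOrder.getD "MODIFIER" 0, cnsqce)]) []
    -- return sorted(consequence_tup, key=lambda x_y: x_y[0])[0][1]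
    match PySem.List.pyGet? (PySem.List.sorted consequence_tup (fun x_y => x_y.1)) 0 with
    | some p => p.2
    | none => ""      -- unreachable: split always yields at least one token

-- ===== PORT B =====
def get_worst_consequence_alt (consequence : String) (sep : String) : String :=
  match PySem.Str.split? consequence sep with
  | none => ""        -- empty separator: Python raises ValueError; excluded by Pre_
  | some tokens =>
    match tokens with
    | [] => ""        -- unreachable: split always yields at least one token
    | t0 :: rest =>
      -- best, best_p = tokens[0], VEP_ORDER.get(tokens[0], 23); then one pass over tokens[1:]
      let st := rest.foldl (fun (st : String × Int) tok =>
        let p := vepOrder.getD tok 23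
        if p < st.2 then (tok, p) else st) (t0, vepOrder.getD t0 23)
      st.1

-- ===== PRECONDITION & SPEC =====
-- Pre_ excludes exactly the empty separator, on which Python's str.split raises ValueError (in A and in B).
def Pre_get_worst_consequence (consequence : String) (sep : String) : Prop := sep ≠ ""
instance (consequence : String) (sep : String) : Decidable (Pre_get_worst_consequence consequence sep) := by unfold Pre_get_worst_consequence; infer_instance
def pvWitness_get_worst_consequence : String × String := ("stop_gained&intron_variant&missense_variant", "&")

def Spec_get_worst_consequence (consequence : String) (sep : String) (out : String) : Prop := out = get_worst_consequence_alt consequence sep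
instance (consequence : String) (sep : String) (out : String) : Decidable (Spec_get_worst_consequence consequence sep out) := by unfold Spec_get_worst_consequence; infer_instance

-- ===== CLAIM (what is proved, stated in full; the proofs are below) =====
def Claim_equal_get_worst_consequence : Prop := ∀ (consequence : String) (sep : String), Dom_get_worst_consequence consequence sep → Pre_get_worst_consequence consequence sep → Spec_get_worst_consequence consequence sep (get_worst_consequence consequence sep)

-- ===== LEMMAS AND PROOFS =====

-- the per-token pair A appends, as a plain function
def pvPair (c : String) : Int × String := (vepOrder.getD c 23, c)

-- A's try/except lookup equals the getD-based pair
theorem pvPair_eq (c : String) :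
    (match vepOrder.get? c with
     | some p => (p, c)
     | none => (vepOrder.getD "MODIFIER" 0, c)) = pvPair c := by
  cases h : vepOrder.get? c with
  | none =>
      simp [pvPair, PySem.Dict.getD_eq_get?_getD, h]
      decide
  | some p => simp [pvPair, PySem.Dict.getD_eq_get?_getD, h]

-- the append-in-a-loop build is init ++ map
theorem foldl_append_map {α β : Type} (g : α → β) :
    ∀ (l : List α) (init : List β),
      l.foldl (fun acc c => acc ++ [g c]) init = init ++ l.map g := by
  intro l
  induction l with
  | nil => simp
  | cons x xs ih => intro init; simp [List.foldl_cons, ih]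

-- head of insertBy with the strict-key comparison
theorem head?_insertBy (before : (Int × String) → (Int × String) → Bool)
    (x : Int × String) (ys : List (Int × String)) :
    (PySem.List.insertBy before x ys).head? =
      some (match ys.head? with
            | none => x
            | some y => if before x y then x else y) := by
  cases ys with
  | nil => simp [PySem.List.insertBy]
  | cons y t =>
      by_cases h : before x y = true <;> simp [PySem.List.insertBy, h]

-- running step on heads through the insertBy fold
def pvStep (o : Option (Int × String)) (x : Int × String) : Option (Int × String) :=
  some (match o with
        | none => x
        | some b => if x.1 < b.1 then x else b)

theorem head?_foldl_insertBy :
    ∀ (ps : List (Int × String)) (acc : List (Int × String)),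
      (ps.foldl (fun acc x =>
          PySem.List.insertBy (fun a b : Int × String => decide (a.1 < b.1)) x acc) acc).head? =
        ps.foldl pvStep acc.head? := by
  intro ps
  induction ps with
  | nil => intro acc; rfl
  | cons x t ih =>
      intro acc
      rw [List.foldl_cons, ih, List.foldl_cons,
          head?_insertBy (fun a b : Int × String => decide (a.1 < b.1)) x acc]
      cases acc with
      | nil => rfl
      | cons y ys =>
          simp only [List.head?_cons, pvStep]
          by_cases h : x.1 < y.1 <;> simp [h]

-- the some-wrapped step fold is a plain pair fold
theorem foldl_pvStep_some :
    ∀ (ps : List (Int × String)) (b : Int × String),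
      ps.foldl pvStep (some b) =
        some (ps.foldl (fun b x => if x.1 < b.1 then x else b) b) := by
  intro ps
  induction ps with
  | nil => intro b; rfl
  | cons x t ih =>
      intro b
      rw [List.foldl_cons, List.foldl_cons]
      have : pvStep (some b) x = some (if x.1 < b.1 then x else b) := rfl
      rw [this]
      by_cases h : x.1 < b.1 <;> simp [h, ih]

-- B's (String × Int) loop is the snd of the pair-minimum fold over pvPair
theorem alt_fold_eq :
    ∀ (rest : List String) (b : Int × String),
      (rest.foldl (fun (st : String × Int) tok =>
          let p := vepOrder.getD tok 23
          if p < st.2 then (tok, p) else st) (b.2, b.1)).1 =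
        ((rest.map pvPair).foldl (fun b x => if x.1 < b.1 then x else b) b).2 := by
  intro rest
  induction rest with
  | nil => intro b; rfl
  | cons c t ih =>
      intro b
      rw [List.map_cons, List.foldl_cons, List.foldl_cons]
      by_cases h : vepOrder.getD c 23 < b.1
      · simpa [pvPair, h] using ih (pvPair c)
      · simpa [pvPair, h] using ih b

-- head of A's sorted tuple list equals B's loop result, for any token list
theorem sorted_head_eq_fold (toks : List String) :
    (PySem.List.sorted (toks.map pvPair) (fun x_y => x_y.1)).head? =
      match toks with
      | [] => none
      | t0 :: rest =>
          some ((rest.map pvPair).foldl (fun b x => if x.1 < b.1 then x else b) (pvPair t0)) := by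
  rw [PySem.List.sorted_eq_foldl_insertBy (toks.map pvPair) (fun x_y => x_y.1)]
  rw [head?_foldl_insertBy (toks.map pvPair) []]
  cases toks with
  | nil => rfl
  | cons t0 rest =>
      rw [List.map_cons, List.foldl_cons]
      have h0 : pvStep ([] : List (Int × String)).head? (pvPair t0) = some (pvPair t0) := rfl
      rw [h0, foldl_pvStep_some]

-- ===== VERDICT (by name: the statement is the Claim_ definition above) =====
theorem get_worst_consequence_spec : Claim_equal_get_worst_consequence := by
  intro consequence sep _ _
  unfold Spec_get_worst_consequence get_worst_consequence get_worst_consequence_alt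
  cases hs : PySem.Str.split? consequence sep with
  | none => rfl
  | some toks =>
      simp only []
      have htup : toks.foldl (fun acc cnsqce =>
          acc ++ [match vepOrder.get? cnsqce with
                  | some p => (p, cnsqce)
                  | none => (vepOrder.getD "MODIFIER" 0, cnsqce)]) [] = toks.map pvPair := by
        have := foldl_append_map pvPair toks []
        simpa [pvPair_eq] using this
      rw [htup]
      cases toks with
      | nil =>
          simp [PySem.List.pyGet?]
      | cons t0 rest =>
          have hhead := sorted_head_eq_fold (t0 :: rest)
          have hlen : (PySem.List.sorted ((t0 :: rest).map pvPair) (fun x_y => x_y.1)) ≠ [] := by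
            intro h
            rw [h] at hhead
            simp at hhead
          have hget : PySem.List.pyGet?
              (PySem.List.sorted ((t0 :: rest).map pvPair) (fun x_y => x_y.1)) 0 =
              (PySem.List.sorted ((t0 :: rest).map pvPair) (fun x_y => x_y.1)).head? := by
            cases hl : PySem.List.sorted ((t0 :: rest).map pvPair) (fun x_y => x_y.1) with
            | nil => exact absurd hl hlen
            | cons a l => simp [PySem.List.pyGet?, PySem.List.pyIdx?]
          rw [hget, hhead]
          simp only []
          have := alt_fold_eq rest (pvPair t0)
          simpa [pvPair] using this.symm
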